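-- pv_equiv track=rewrite | github.com/shimu0215/DOGe | AgentDistill/src/smolagents/agents.py | get_most_common_output_code
-- ===== SOURCE A (Python) =====
-- from collections import deque, defaultdict
--
-- def get_most_common_output_code(pairs):
--     output_to_codes = defaultdict(list)
--
--     for code_output, code in pairs:
--         output_to_codes[code_output].append(code)
--
--     # Find the output with the most identical outputs
--     most_common_output = max(output_to_codes.items(), key=lambda x: len(x[1]))[0]
--
--     # If all outputs are different, len() == 1 for each list
--     if all(len(codes) == 1 for codes in output_to_codes.values()):
--         return pairs[0][1]  # return the first code
--     else:
--         return output_to_codes[most_common_output][0]  # return the first code with the most common output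
-- ===== SOURCE B (Python) =====
-- from collections import Counter
--
-- def get_most_common_output_code(pairs):
--     counts = Counter(output for output, _ in pairs)
--     best = max(counts, key=counts.get)  # first-inserted key wins ties; raises ValueError on empty, like A's max
--     for output, code in pairs:
--         if output == best:
--             return code
-- ===== Notes on version B (the rewrite author's own statement) =====
-- stated objective: simpler
-- what changed: B counts outputs with collections.Counter and rescans pairs for the first code of the winning output, instead of building per-output code lists, taking max over dict items and branching on an all()-distinct special case that A's else branch already covers.
import Mathlib
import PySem

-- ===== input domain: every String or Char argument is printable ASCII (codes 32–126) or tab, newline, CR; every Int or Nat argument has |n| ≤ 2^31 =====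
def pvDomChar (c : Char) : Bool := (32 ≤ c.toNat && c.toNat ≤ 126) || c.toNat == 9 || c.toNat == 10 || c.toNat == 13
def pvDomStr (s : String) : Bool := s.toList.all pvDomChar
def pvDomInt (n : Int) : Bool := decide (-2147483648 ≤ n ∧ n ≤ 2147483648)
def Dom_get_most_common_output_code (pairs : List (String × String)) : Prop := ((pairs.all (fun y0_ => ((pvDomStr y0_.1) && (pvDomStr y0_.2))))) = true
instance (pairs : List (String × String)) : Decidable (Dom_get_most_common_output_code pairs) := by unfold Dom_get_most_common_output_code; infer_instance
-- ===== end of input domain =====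

-- B replaces A's per-output code lists + max over dict items + all()-distinct branch by a Counter of
-- outputs and a second scan of pairs for the first code of the winning output (objective: simpler).

-- ===== PORT A =====
def get_most_common_output_code (pairs : List (String × String)) : String :=
  let output_to_codes :=
    pairs.foldl (fun d p => d.modify p.1 [] (fun x => x ++ [p.2])) PySem.Dict.empty
  let most_common_output :=
    ((PySem.List.max? output_to_codes.items (fun x => x.2.length)).map (fun x => x.1)).getD ""
  if output_to_codes.values.all (fun codes => codes.length == 1) then
    ((PySem.List.pyGet? pairs 0).map (fun p => p.2)).getD ""
  else
    (PySem.List.pyGet? (output_to_codes.getD most_common_output []) 0).getD ""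

-- ===== PORT B =====
def get_most_common_output_code_alt (pairs : List (String × String)) : String :=
  let counts := PySem.Dict.counter (pairs.map (fun p => p.1))
  let best := (PySem.List.max? counts.keys (fun k => counts.getD k 0)).getD ""
  ((pairs.find? (fun p => p.1 == best)).map (fun p => p.2)).getD ""

-- ===== PRECONDITION & SPEC =====
-- Pre_ excludes only the empty list, on which both A's and B's max() raise ValueError.
def Pre_get_most_common_output_code (pairs : List (String × String)) : Prop := pairs ≠ []
instance (pairs : List (String × String)) : Decidable (Pre_get_most_common_output_code pairs) := by unfold Pre_get_most_common_output_code; infer_instance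

def pvWitness_get_most_common_output_code : (List (String × String)) := [("a", "x"), ("b", "y"), ("a", "z")]

def Spec_get_most_common_output_code (pairs : List (String × String)) (out : String) : Prop := out = get_most_common_output_code_alt pairs
instance (pairs : List (String × String)) (out : String) : Decidable (Spec_get_most_common_output_code pairs out) := by unfold Spec_get_most_common_output_code; infer_instance

-- ===== CLAIM (what is proved, stated in full; the proofs are below) =====
def Claim_equal_get_most_common_output_code : Prop := ∀ (pairs : List (String × String)), Dom_get_most_common_output_code pairs → Pre_get_most_common_output_code pairs → Spec_get_most_common_output_code pairs (get_most_common_output_code pairs)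

-- ===== LEMMAS AND PROOFS =====

-- pairs[0] on a list
theorem pv_pyGet?_zero {α : Type} (xs : List α) : PySem.List.pyGet? xs 0 = xs.head? := by
  cases xs <;> simp [PySem.List.pyGet?, PySem.List.pyIdx?]

-- max over a mapped list with a key reading only the image
theorem pv_foldl_max_map {α β κ : Type} [LT κ] [DecidableLT κ] (l : List α) (f : α → β) (g : β → κ)
    (acc : Option α) :
    List.foldl (fun acc x => match acc with
      | none => some x
      | some m => if g m < g x then some x else some m) (acc.map f) (l.map f)
      = (List.foldl (fun acc x => match acc with
      | none => some x
      | some m => if g (f m) < g (f x) then some x else some m) acc l).map f := by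
  induction l generalizing acc with
  | nil => rfl
  | cons x t ih =>
    cases acc with
    | none => simpa using ih (some x)
    | some m =>
      simp only [List.map_cons, List.foldl_cons, Option.map_some]
      by_cases h : g (f m) < g (f x) <;> simp [h, ← ih]

theorem pv_max?_map {α β κ : Type} [LT κ] [DecidableLT κ] (l : List α) (f : α → β) (g : β → κ) :
    PySem.List.max? (l.map f) g = (PySem.List.max? l (fun x => g (f x))).map f := by
  simpa using pv_foldl_max_map l f g none

-- a Nat-valued key cast to Int picks the same (first) maximum
theorem pv_max?_natCast {α : Type} (l : List α) (f : α → Nat) :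
    PySem.List.max? l (fun x => ((f x : Nat) : Int)) = PySem.List.max? l f := by
  unfold PySem.List.max?
  congr 1
  funext a x
  cases a with
  | none => rfl
  | some m => simp [Nat.cast_lt]

-- a constant key makes max? return the first element
theorem pv_foldl_max_const {α : Type} (t : List α) (key : α → Nat) (c : Nat) (m : α)
    (hm : key m = c) (h : ∀ x ∈ t, key x = c) :
    List.foldl (fun acc x => match acc with
      | none => some x
      | some m => if key m < key x then some x else some m) (some m) t = some m := by
  induction t generalizing m with
  | nil => rfl
  | cons x t ih =>
    have hx : key x = c := h x (List.mem_cons_self)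
    simp only [List.foldl_cons, hm, hx, lt_irrefl, ite_false]
    exact ih m hm (fun y hy => h y (List.mem_cons_of_mem _ hy))

theorem pv_max?_const {α : Type} (l : List α) (key : α → Nat) (c : Nat)
    (h : ∀ x ∈ l, key x = c) : PySem.List.max? l key = l.head? := by
  cases l with
  | nil => rfl
  | cons x t =>
    unfold PySem.List.max?
    simp only [List.foldl_cons, List.head?_cons]
    exact pv_foldl_max_const t key c x (h x (List.mem_cons_self))
      (fun y hy => h y (List.mem_cons_of_mem _ hy))

-- building a set only appends: the head survives
theorem pv_foldl_add_head {α : Type} [BEq α] (l : List α) (s : PySem.Set α) (h : s ≠ []) :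
    (List.foldl PySem.Set.add s l).head? = s.head? := by
  induction l generalizing s with
  | nil => rfl
  | cons x t ih =>
    have hne : PySem.Set.add s x ≠ [] := by
      unfold PySem.Set.add; split_ifs <;> simp [h]
    rw [List.foldl_cons, ih _ hne]
    unfold PySem.Set.add
    split_ifs with hc
    · rfl
    · cases s with
      | nil => exact absurd rfl h
      | cons a u => simp

theorem pv_ofList_head {α : Type} [BEq α] (x : α) (l : List α) :
    (PySem.Set.ofList (x :: l)).head? = some x := by
  unfold PySem.Set.ofList
  rw [List.foldl_cons]
  have : PySem.Set.add PySem.Set.empty x = [x] := by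
    unfold PySem.Set.add PySem.Set.empty PySem.Set.contains
    simp
  rw [this, pv_foldl_add_head l [x] (by simp)]
  rfl

-- the group of codes for output c, in order
def pvGroup (pairs : List (String × String)) (c : String) : List String :=
  (pairs.filter (fun p => p.1 == c)).map (fun x => x.2)

theorem get_most_common_output_code_correct (pairs : List (String × String))
    (hpre : pairs ≠ []) :
    get_most_common_output_code pairs = get_most_common_output_code_alt pairs := by
  obtain ⟨q, rest, rfl⟩ := List.exists_cons_of_ne_nil hpre
  set pairs := q :: rest with hpairs
  unfold get_most_common_output_code
  set d := pairs.foldl (fun d p => d.modify p.1 [] (fun x => x ++ [p.2])) PySem.Dict.empty with hd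
  set K := PySem.Set.ofList (pairs.map (fun p => p.1)) with hK
  have hnd : d.keys.Nodup := by
    apply PySem.Dict.nodup_keys_foldl_modify_key
    simp [PySem.Dict.keys_empty]
  have hkeys : d.keys = K := by
    rw [hd, PySem.Dict.keys_foldl_modify_key pairs (fun p => p.1) [] (fun _ p => fun x => x ++ [p.2])]
    rw [PySem.Dict.keys_empty]
    rfl
  have hgetD : ∀ c, d.getD c [] = pvGroup pairs c := by
    intro c
    rw [hd]
    simpa [PySem.Dict.getD_empty, pvGroup] using
      PySem.Dict.getD_foldl_modify_append pairs PySem.Dict.empty c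
  have hitems : d.items = K.map (fun k => (k, pvGroup pairs k)) := by
    rw [PySem.Dict.items_eq_map_keys d hnd [], hkeys]
    simp only [hgetD]
  have hvalues : d.values = K.map (fun k => pvGroup pairs k) := by
    rw [PySem.Dict.values_eq_map_keys d hnd [], hkeys]
    simp only [hgetD]
  -- A's argmax over items is the argmax over K by group length
  have hmaxA : (PySem.List.max? d.items (fun x => x.2.length)).map (fun x => x.1)
      = PySem.List.max? K (fun k => (pvGroup pairs k).length) := by
    rw [hitems, pv_max?_map, Option.map_map]
    simp [Function.comp_def]
  -- B's argmax over counter keys is the same argmax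
  have hcount : (fun k => (PySem.Dict.counter (pairs.map (fun p => p.1))).getD k 0)
      = fun k => (((pvGroup pairs k).length : Nat) : Int) := by
    funext k
    rw [PySem.Dict.getD_counter]
    congr 1
    rw [pvGroup, List.length_map, ← List.countP_eq_length_filter, List.count_eq_countP, List.countP_map]
    rfl
  have hmaxB : PySem.List.max? (PySem.Dict.counter (pairs.map (fun p => p.1))).keys
      (fun k => (PySem.Dict.counter (pairs.map (fun p => p.1))).getD k 0)
      = PySem.List.max? K (fun k => (pvGroup pairs k).length) := by
    rw [PySem.Dict.keys_counter, hcount, pv_max?_natCast]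
  have hKhead : K.head? = some q.1 := by
    rw [hK, hpairs, List.map_cons]
    exact pv_ofList_head q.1 (rest.map (fun p => p.1))
  have hKne : K ≠ [] := by
    intro h; rw [h] at hKhead; simp at hKhead
  have halt : get_most_common_output_code_alt pairs
      = ((pairs.find? (fun p => p.1 ==
          ((PySem.List.max? (PySem.Dict.counter (pairs.map (fun p => p.1))).keys
            (fun k => (PySem.Dict.counter (pairs.map (fun p => p.1))).getD k 0)).getD ""))).map
          (fun p => p.2)).getD "" := rfl
  by_cases hall : d.values.all (fun codes => codes.length == 1)
  · -- all groups have one element: the first key is the argmax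
    have hone : ∀ k ∈ K, (pvGroup pairs k).length = 1 := by
      intro k hk
      have := List.all_eq_true.mp hall (pvGroup pairs k)
        (by rw [hvalues]; exact List.mem_map_of_mem hk)
      simpa using this
    have hmax1 : PySem.List.max? K (fun k => (pvGroup pairs k).length) = some q.1 := by
      rw [pv_max?_const K _ 1 hone, hKhead]
    rw [if_pos hall, halt, hmaxB, hmax1]
    simp only [Option.getD_some]
    rw [hpairs, pv_pyGet?_zero]
    have hf : (q :: rest).find? (fun p => p.1 == q.1) = some q := by
      rw [List.find?_cons_of_pos]; simp
    rw [hf]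
    simp
  · -- the argmax output's first code is the first matching pair's code
    obtain ⟨m, hm⟩ : ∃ m, PySem.List.max? K (fun k => (pvGroup pairs k).length) = some m := by
      cases h : PySem.List.max? K (fun k => (pvGroup pairs k).length) with
      | none => exact absurd (Iff.mp (PySem.List.max?_eq_none_iff _ _) h) hKne
      | some m => exact ⟨m, rfl⟩
    rw [if_neg hall, halt, hmaxA, hmaxB, hm]
    simp only [Option.getD_some]
    rw [hgetD, pv_pyGet?_zero, pvGroup, List.head?_map, List.head?_filter]

-- ===== VERDICT (by name: the statement is the Claim_ definition above) =====
theorem get_most_common_output_code_spec : Claim_equal_get_most_common_output_code := by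
  intro pairs _ hpre
  unfold Spec_get_most_common_output_code
  exact get_most_common_output_code_correct pairs hpre
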